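-- pv_equiv track=rewrite | github.com/ganguloo/sandbox | gray/validator.py | generate_theorem3
-- ===== SOURCE A (Python) =====
-- def get_binary(val, n):
--     return [int(x) for x in format(val, f'0{n}b')]
--
-- def generate_theorem1(b, n):
--     ineqs = set()
--     b_bin = get_binary(b, n)
--     for k in range(1, n + 1):
--         if b_bin[k-1] == 0:
--             S_k = [j for j in range(1, k) if b_bin[j-1] == 1] + [k]
--             blocks = []
--             if S_k:
--                 current_block = [S_k[0]]
--                 for j in S_k[1:]:
--                     if j == current_block[-1] + 1:
--                         current_block.append(j)
--                     else:
--                         blocks.append(current_block)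
--                         current_block = [j]
--                 blocks.append(current_block)
--
--             p = len(blocks)
--             coeffs = [0] * n
--             for block in blocks:
--                 coeffs[block[0]-1] = 1
--                 for j in block[1:]:
--                     coeffs[j-1] = -1
--             ineqs.add((tuple(coeffs), p - 1))
--     return ineqs
--
-- def generate_theorem2(a, n):
--     b_prime = (2**n - 1) - a
--     base_ineqs = generate_theorem1(b_prime, n)
--     mirrored = set()
--     for coeffs, rhs in base_ineqs:
--         c = list(coeffs)
--         c1 = c[0]
--         c[0] = -c1
--         new_rhs = rhs - c1
--         mirrored.add((tuple(c), new_rhs))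
--     return mirrored
--
-- def generate_theorem3(a, b, n):
--     a_bin = get_binary(a, n)
--     b_bin = get_binary(b, n)
--
--     m = -1
--     for i in range(n):
--         if a_bin[i] != b_bin[i]:
--             m = i + 1
--             break
--     if m == -1: return set()
--
--     half_size = 2**(n - m)
--     size_A = half_size - (a % half_size)
--     size_B = (b % half_size) + 1
--
--     U = generate_theorem1(b, n)
--     L = generate_theorem2(a, n)
--
--     final_ineqs = set()
--
--     if size_A > size_B:
--         final_ineqs.update(U)
--         for coeffs, rhs in L:
--             c = list(coeffs)
--             c[m-1] = 0
--             final_ineqs.add((tuple(c), rhs))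
--     elif size_A < size_B:
--         final_ineqs.update(L)
--         for coeffs, rhs in U:
--             c = list(coeffs)
--             cm = c[m-1]
--             c[m-1] = 0
--             final_ineqs.add((tuple(c), rhs - cm))
--     else:
--         for coeffs, rhs in L:
--             c = list(coeffs)
--             c[m-1] = 0
--             final_ineqs.add((tuple(c), rhs))
--         for coeffs, rhs in U:
--             c = list(coeffs)
--             cm = c[m-1]
--             c[m-1] = 0
--             final_ineqs.add((tuple(c), rhs - cm))
--
--     return final_ineqs
-- ===== SOURCE B (Python) =====
-- def generate_theorem3(a, b, n):
--     # Closed-form re-implementation: no generate_theorem1/2 helpers and no sequential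
--     # run detection.  For a zero bit k of a bit-vector bv, the relevant mask is
--     # s = {set bits below k} + {k}; the coefficient at position j is determined
--     # LOCALLY: +1 where a block of s starts (j in s, j-1 not in s), -1 where it
--     # continues (j in s, j-1 in s), 0 elsewhere; the rhs is (#blocks - 1), which is
--     # recovered from the vector itself as coeffs.count(1) - 1.
--     def bits(v):
--         return [1 if ch == '1' else 0 for ch in bin(v)[2:].zfill(n)[:n]]
--
--     a_bin = bits(a)
--     b_bin = bits(b)
--     m = next((i + 1 for i in range(n) if a_bin[i] != b_bin[i]), -1)
--     if m == -1:
--         return set()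
--
--     def row(bv, k):
--         def s(j):
--             return j == k or (1 <= j < k and bv[j - 1] == 1)
--         coeffs = tuple((-1 if s(j - 1) else 1) if s(j) else 0 for j in range(1, n + 1))
--         return coeffs, coeffs.count(1) - 1
--
--     U = set()
--     for k in range(1, n + 1):
--         if b_bin[k - 1] == 0:
--             U.add(row(b_bin, k))
--
--     c_bin = bits(2 ** n - 1 - a)
--     L = set()
--     for k in range(1, n + 1):
--         if c_bin[k - 1] == 0:
--             coeffs, rhs = row(c_bin, k)
--             L.add(((-coeffs[0],) + coeffs[1:], rhs - coeffs[0]))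
--
--     half = 2 ** (n - m)
--     size_A = half - a % half
--     size_B = b % half + 1
--
--     def zeroed(rs, adjust):
--         return [(cs[:m - 1] + (0,) + cs[m:], r - cs[m - 1] if adjust else r)
--                 for cs, r in rs]
--
--     final = set()
--     if size_A > size_B:
--         final.update(U)
--         final.update(zeroed(L, False))
--     elif size_A < size_B:
--         final.update(L)
--         final.update(zeroed(U, True))
--     else:
--         final.update(zeroed(L, False))
--         final.update(zeroed(U, True))
--     return final
-- ===== Notes on version B (the rewrite author's own statement) =====
-- stated objective: alternative
-- what changed: Replaced theorem1/theorem2's sequential run detection (build S_k, group it into consecutive blocks, then fill the vector block by block) by a closed-form positional rule: each coefficient is computed locally from the bit mask (+1 where a block starts, i.e. j in the mask but j-1 not, -1 where it continues, 0 elsewhere), the rhs is recovered from the vector itself as coeffs.count(1)-1, the theorem-2 mirror is applied inline per row, and the final coordinate-m zeroing is done by tuple slicing.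
import Mathlib
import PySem

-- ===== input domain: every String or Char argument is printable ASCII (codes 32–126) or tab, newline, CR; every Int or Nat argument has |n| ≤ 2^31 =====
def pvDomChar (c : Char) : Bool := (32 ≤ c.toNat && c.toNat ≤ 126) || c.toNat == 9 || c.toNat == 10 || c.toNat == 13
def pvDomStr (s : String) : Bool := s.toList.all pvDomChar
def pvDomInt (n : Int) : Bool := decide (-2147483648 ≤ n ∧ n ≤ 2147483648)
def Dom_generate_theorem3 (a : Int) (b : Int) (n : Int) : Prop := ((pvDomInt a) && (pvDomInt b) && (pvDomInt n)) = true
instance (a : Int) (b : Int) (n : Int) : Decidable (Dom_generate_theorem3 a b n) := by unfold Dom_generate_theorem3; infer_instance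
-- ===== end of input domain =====

-- B is an alternative closed-form decomposition of A (no theorem1/theorem2 helpers and no
-- sequential run detection: each coefficient is determined locally from the bit mask and
-- the rhs is recovered as the count of +1 coefficients); equal return value on Pre_.

-- ===== PORT A =====
-- the characters of bin(v)[2:] read as B's bits reads them ('1' ↦ 1, any other ↦ 0):
-- for v < 0, bin(v)[2:] is 'b' followed by the digits of |v| (exact for B's use); A's
-- get_binary feeds '-' to int() for v < 0 and raises ValueError (excluded by Pre_)
def pyBinDigits (v : Int) : List Int :=
  if v < 0 then 0 :: (Nat.digits 2 v.natAbs).reverse.map (fun d => (d : Int))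
  else if v.toNat = 0 then [0] else (Nat.digits 2 v.toNat).reverse.map (fun d => (d : Int))

-- get_binary(val, n) = [int(x) for x in format(val, f'0{n}b')]; exact for 0 ≤ val, 0 ≤ n
-- (A only reaches it on such inputs inside Pre_)
def get_binary (val n : Int) : List Int :=
  List.replicate (n.toNat - (pyBinDigits val).length) 0 ++ pyBinDigits val

-- the body of A's blocks loop
def blockStep (st : List (List Int) × List Int) (j : Int) : List (List Int) × List Int :=
  if j = st.2.getLast! + 1 then (st.1, st.2 ++ [j]) else (st.1 ++ [st.2], [j])

-- the body of A's coeffs loop (block[0] on [] raises in Python; blocks are never empty)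
def writeBlock (cs : List Int) (block : List Int) : List Int :=
  match block with
  | [] => cs
  | h :: t => t.foldl (fun cs j => cs.set (j - 1).toNat (-1)) (cs.set (h - 1).toNat 1)

-- the per-k body of generate_theorem1's loop: S_k, blocks, p, coeffs
def theorem1Row (b_bin : List Int) (n k : Int) : List Int × Int :=
  let S_k := (PySem.List.pyRange 1 k 1).filter (fun j => PySem.List.pyGetD b_bin (j - 1) 0 == 1) ++ [k]
  let blocks : List (List Int) :=
    match S_k with
    | [] => []
    | s0 :: rest =>
      let st := rest.foldl blockStep ([], [s0])
      st.1 ++ [st.2]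
  let p : Int := blocks.length
  let coeffs := blocks.foldl writeBlock (List.replicate n.toNat 0)
  (coeffs, p - 1)

def theorem1Core (b_bin : List Int) (n : Int) : PySem.Set (List Int × Int) :=
  (PySem.List.pyRange 1 (n + 1) 1).foldl
    (fun ineqs k =>
      if PySem.List.pyGetD b_bin (k - 1) 0 == 0 then PySem.Set.add ineqs (theorem1Row b_bin n k)
      else ineqs)
    PySem.Set.empty

def generate_theorem1 (b n : Int) : PySem.Set (List Int × Int) :=
  theorem1Core (get_binary b n) n

-- the body of generate_theorem2's mirror loop (c[0]: lists are nonempty whenever iterated)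
def mirrorRow (cr : List Int × Int) : List Int × Int :=
  let c1 := PySem.List.pyGetD cr.1 0 0
  (cr.1.set 0 (-c1), cr.2 - c1)

-- 2**n ported as 2 ^ n.toNat: exact for 0 ≤ n (Pre_)
def generate_theorem2 (a n : Int) : PySem.Set (List Int × Int) :=
  (generate_theorem1 (2 ^ n.toNat - 1 - a) n).foldl
    (fun mirrored cr => PySem.Set.add mirrored (mirrorRow cr)) PySem.Set.empty

def generate_theorem3 (a : Int) (b : Int) (n : Int) : List (List Int × Int) :=
  let a_bin := get_binary a n
  let b_bin := get_binary b n
  -- the for-with-break search ported as a fold carrying m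
  let m := (PySem.List.pyRange 0 n 1).foldl
      (fun m i =>
        if m == -1 && !(PySem.List.pyGetD a_bin i 0 == PySem.List.pyGetD b_bin i 0) then i + 1
        else m) (-1)
  if m == -1 then [] else
    let half_size : Int := 2 ^ (n - m).toNat   -- 2**(n-m); 0 ≤ n - m whenever reached
    let size_A := half_size - PySem.Int.mod a half_size
    let size_B := PySem.Int.mod b half_size + 1
    let U := generate_theorem1 b n
    let L := generate_theorem2 a n
    let final : PySem.Set (List Int × Int) := PySem.Set.empty
    if size_A > size_B then
      let final := U.foldl PySem.Set.add final
      L.foldl (fun f cr => PySem.Set.add f (cr.1.set (m - 1).toNat 0, cr.2)) final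
    else if size_A < size_B then
      let final := L.foldl PySem.Set.add final
      U.foldl (fun f cr =>
        PySem.Set.add f (cr.1.set (m - 1).toNat 0, cr.2 - PySem.List.pyGetD cr.1 (m - 1) 0)) final
    else
      let final := L.foldl (fun f cr => PySem.Set.add f (cr.1.set (m - 1).toNat 0, cr.2)) final
      U.foldl (fun f cr =>
        PySem.Set.add f (cr.1.set (m - 1).toNat 0, cr.2 - PySem.List.pyGetD cr.1 (m - 1) 0)) final

-- ===== PORT B =====
-- bin(v)[2:].zfill(n)[:n]; exact for 0 ≤ v, 0 ≤ n (Pre_)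
def altBits (v n : Int) : List Int :=
  (List.replicate (n.toNat - (pyBinDigits v).length) 0 ++ pyBinDigits v).take n.toNat

-- B's local mask predicate s(j) = (j == k or 1 <= j < k and bv[j-1] == 1)
def altS (bv : List Int) (k j : Int) : Bool :=
  j == k || (decide (1 ≤ j) && (decide (j < k) && (PySem.List.pyGetD bv (j - 1) 0 == 1)))

-- B's row: each coefficient computed locally; rhs = coeffs.count(1) - 1
def altRow (bv : List Int) (n k : Int) : List Int × Int :=
  let coeffs := (PySem.List.pyRange 1 (n + 1) 1).map
    (fun j => if altS bv k j then (if altS bv k (j - 1) then (-1 : Int) else 1) else 0)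
  (coeffs, (PySem.List.count coeffs 1 : Int) - 1)

def generate_theorem3_alt (a : Int) (b : Int) (n : Int) : List (List Int × Int) :=
  let a_bin := altBits a n
  let b_bin := altBits b n
  -- next((i + 1 for i in range(n) if a_bin[i] != b_bin[i]), -1)
  let m :=
    (((PySem.List.pyRange 0 n 1).find?
        (fun i => !(PySem.List.pyGetD a_bin i 0 == PySem.List.pyGetD b_bin i 0))).map
      (fun i => i + 1)).getD (-1)
  if m == -1 then [] else
    let U := (PySem.List.pyRange 1 (n + 1) 1).foldl
      (fun (U : PySem.Set (List Int × Int)) k =>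
        if PySem.List.pyGetD b_bin (k - 1) 0 == 0 then PySem.Set.add U (altRow b_bin n k)
        else U) PySem.Set.empty
    let c_bin := altBits (2 ^ n.toNat - 1 - a) n
    let L := (PySem.List.pyRange 1 (n + 1) 1).foldl
      (fun (L : PySem.Set (List Int × Int)) k =>
        if PySem.List.pyGetD c_bin (k - 1) 0 == 0 then
          let r := altRow c_bin n k
          let c0 := PySem.List.pyGetD r.1 0 0
          PySem.Set.add L ((-c0) :: PySem.List.slice r.1 (some 1) none, r.2 - c0)
        else L) PySem.Set.empty
    let half : Int := 2 ^ (n - m).toNat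
    let size_A := half - PySem.Int.mod a half
    let size_B := PySem.Int.mod b half + 1
    let zeroed := fun (rs : List (List Int × Int)) (adjust : Bool) =>
      rs.map (fun cr =>
        (PySem.List.slice cr.1 none (some (m - 1)) ++ [0] ++ PySem.List.slice cr.1 (some m) none,
         if adjust then cr.2 - PySem.List.pyGetD cr.1 (m - 1) 0 else cr.2))
    if size_A > size_B then
      (zeroed L false).foldl PySem.Set.add (U.foldl PySem.Set.add PySem.Set.empty)
    else if size_A < size_B then
      (zeroed U true).foldl PySem.Set.add (L.foldl PySem.Set.add PySem.Set.empty)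
    else
      (zeroed U true).foldl PySem.Set.add ((zeroed L false).foldl PySem.Set.add PySem.Set.empty)

-- ===== PRECONDITION & SPEC =====
-- Pre_ is exactly A's return domain: a, b, n nonnegative (else format/int raises ValueError)
-- and either a < 2^n, or the top n bits of a's and b's padded binary strings coincide (then A
-- finds no differing bit and returns the empty set; on the remaining a ≥ 2^n inputs A raises
-- ValueError on get_binary of the negative 2^n-1-a).
def Pre_generate_theorem3 (a : Int) (b : Int) (n : Int) : Prop :=
  0 ≤ n ∧ 0 ≤ a ∧ 0 ≤ b ∧
    (a < 2 ^ n.toNat ∨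
      a >>> (PySem.Int.bitLength a - n.toNat) = b >>> (PySem.Int.bitLength b - n.toNat))
instance (a : Int) (b : Int) (n : Int) : Decidable (Pre_generate_theorem3 a b n) := by
  unfold Pre_generate_theorem3; infer_instance

def pvWitness_generate_theorem3 : Int × Int × Int := (1, 6, 3)

def Spec_generate_theorem3 (a : Int) (b : Int) (n : Int) (out : List (List Int × Int)) : Prop := out = generate_theorem3_alt a b n
instance (a : Int) (b : Int) (n : Int) (out : List (List Int × Int)) : Decidable (Spec_generate_theorem3 a b n out) := by unfold Spec_generate_theorem3; infer_instance

-- ===== CLAIM (what is proved, stated in full; the proofs are below) =====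
def Claim_equal_generate_theorem3 : Prop := ∀ (a : Int) (b : Int) (n : Int), Dom_generate_theorem3 a b n → Pre_generate_theorem3 a b n → Spec_generate_theorem3 a b n (generate_theorem3 a b n)

-- ===== LEMMAS AND PROOFS =====

-- the common normal form both rows are proved equal to: coefficient at position j is
-- +1 at a block start of S (j ∈ S, j-1 ∉ S), -1 inside a block, 0 off S
def nf (S : List Int) (n : Int) : List Int :=
  (PySem.List.pyRange 1 (n + 1) 1).map
    (fun j => if j ∈ S then (if j - 1 ∈ S then (-1 : Int) else 1) else 0)

-- A's S_k list
def Sof (bv : List Int) (k : Int) : List Int :=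
  (PySem.List.pyRange 1 k 1).filter (fun j => PySem.List.pyGetD bv (j - 1) 0 == 1) ++ [k]

lemma length_nf (S : List Int) (n : Int) : (nf S n).length = n.toNat := by
  simp [nf, PySem.List.length_pyRange_one]

lemma getElem_nf (S : List Int) (n : Int) (i : Nat) (h : i < (nf S n).length) :
    (nf S n)[i] = if (1 + (i : Int)) ∈ S then (if (i : Int) ∈ S then (-1 : Int) else 1) else 0 := by
  simp only [nf, List.getElem_map, PySem.List.getElem_pyRange_one]
  norm_num

-- count after a set, in Int form
lemma count_set_int (l : List Int) (i : Nat) (h : i < l.length) (v x : Int) :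
    (((l.set i v).count x : Nat) : Int) =
      (l.count x : Int) - (if l[i] = x then 1 else 0) + (if v = x then 1 else 0) := by
  have hdecomp : l.take i ++ l[i] :: l.drop (i + 1) = l := by simp [List.getElem_cons_drop]
  have h1 : (l.set i v).count x
      = (l.take i).count x + ((l.drop (i + 1)).count x + if v == x then 1 else 0) := by
    rw [List.set_eq_take_cons_drop v h, List.count_append, List.count_cons]
  have h2 : l.count x
      = (l.take i).count x + ((l.drop (i + 1)).count x + if l[i] == x then 1 else 0) := by
    conv_lhs => rw [← hdecomp]
    rw [List.count_append, List.count_cons]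
  rw [h1, h2]
  push_cast
  simp only [beq_iff_eq]
  split_ifs <;> omega

-- (l ++ [a]).getLast! = a
lemma getLast!_concat (l : List Int) (a : Int) : (l ++ [a]).getLast! = a := by
  induction l with
  | nil => rfl
  | cons x t ih => simp [List.getLast!]

-- writeBlock preserves length
lemma foldl_setneg_length (t : List Int) :
    ∀ (cs : List Int), (t.foldl (fun cs j => cs.set (j - 1).toNat (-1)) cs).length = cs.length := by
  induction t with
  | nil => intro _; rfl
  | cons j t ih => intro cs; rw [List.foldl_cons, ih, List.length_set]

lemma writeBlock_length (cs : List Int) (block : List Int) :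
    (writeBlock cs block).length = cs.length := by
  cases block with
  | nil => rfl
  | cons h t =>
    show (t.foldl (fun cs j => cs.set (j - 1).toNat (-1)) (cs.set (h - 1).toNat 1)).length = cs.length
    rw [foldl_setneg_length, List.length_set]

lemma foldl_writeBlock_length (blocks : List (List Int)) :
    ∀ (cs : List Int), (blocks.foldl writeBlock cs).length = cs.length := by
  induction blocks with
  | nil => intro cs; rfl
  | cons b bs ih => intro cs; rw [List.foldl_cons, ih, writeBlock_length]

-- writeBlock of a block extended on the right
lemma writeBlock_snoc (cs : List Int) (cur : List Int) (j : Int) (h : cur ≠ []) :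
    writeBlock cs (cur ++ [j]) = (writeBlock cs cur).set (j - 1).toNat (-1) := by
  obtain ⟨x, t, rfl⟩ : ∃ x t, cur = x :: t := by
    cases cur with
    | nil => exact absurd rfl h
    | cons x t => exact ⟨x, t, rfl⟩
  simp [writeBlock, List.foldl_append]

-- nf of a snoc-extended strictly increasing list
lemma nf_snoc (S : List Int) (n j : Int) (h1 : 1 ≤ j) (_h2 : j ≤ n)
    (hlt : ∀ x ∈ S, x < j) :
    nf (S ++ [j]) n = (nf S n).set (j - 1).toNat (if j - 1 ∈ S then (-1 : Int) else 1) := by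
  apply List.ext_getElem
  · simp [length_nf]
  · intro i hi hi'
    have hilen : i < n.toNat := by rw [length_nf] at hi; exact hi
    rw [List.getElem_set]
    rw [getElem_nf _ _ _ hi]
    by_cases hij : (i : Int) = j - 1
    · have : (j - 1).toNat = i := by omega
      rw [if_pos this]
      have hjmem : (1 + (i : Int)) ∈ S ++ [j] := by
        simp [List.mem_append]; right; omega
      rw [if_pos hjmem]
      have : (i : Int) ∈ S ++ [j] ↔ j - 1 ∈ S := by
        simp [List.mem_append]
        constructor
        · rintro (h | h)
          · rwa [hij] at h
          · exfalso; omega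
        · intro h; left; rwa [hij]
      simp only [this]
    · have hne : ¬ (j - 1).toNat = i := by omega
      rw [if_neg hne, getElem_nf _ _ _ (by rw [length_nf]; exact hilen)]
      by_cases hcase : (1 + (i : Int)) = j + 1
      · -- position j+1: outer membership false on both sides
        have ha : (1 + (i : Int)) ∉ S ++ [j] := by
          simp [List.mem_append]
          constructor
          · intro h; have := hlt _ h; omega
          · omega
        have hb : (1 + (i : Int)) ∉ S := by
          intro h; have := hlt _ h; omega
        rw [if_neg ha, if_neg hb]
      · have houter : (1 + (i : Int)) ∈ S ++ [j] ↔ (1 + (i : Int)) ∈ S := by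
          simp [List.mem_append]
          intro h; exfalso; omega
        have hinner : (i : Int) ∈ S ++ [j] ↔ (i : Int) ∈ S := by
          simp [List.mem_append]
          intro h; exfalso; omega
        simp only [houter, hinner]

-- value of nf S at a position beyond every element of S is 0
lemma getElem_nf_big (S : List Int) (n j : Int) (hlt : ∀ x ∈ S, x < j)
    (h1 : 1 ≤ j) (hi : (j - 1).toNat < (nf S n).length) :
    (nf S n)[(j - 1).toNat] = 0 := by
  rw [getElem_nf _ _ _ hi]
  have : (1 + ((j - 1).toNat : Int)) = j := by omega
  rw [this]
  rw [if_neg (fun h => absurd (hlt _ h) (by omega))]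

-- the block-structure invariant: A's blocks-then-fill computation produces the normal
-- form, the block count is the count of +1 coefficients, and the current block's last
-- element is the maximum of S
lemma blocks_char (n : Int) (s0 : Int) (rest : List Int) :
    (s0 :: rest).Pairwise (· < ·) → (∀ j ∈ s0 :: rest, 1 ≤ j ∧ j ≤ n) →
    (let st := rest.foldl blockStep ([], [s0])
     let C := (st.1 ++ [st.2]).foldl writeBlock (List.replicate n.toNat 0)
     C = nf (s0 :: rest) n
       ∧ (st.1.length : Int) + 1 = (C.count 1 : Int)
       ∧ st.2 ≠ [] ∧ st.2.getLast! ∈ s0 :: rest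
       ∧ ∀ x ∈ s0 :: rest, x ≤ st.2.getLast!) := by
  induction rest using List.reverseRecOn with
  | nil =>
    intro _ hbd
    obtain ⟨hs1, hsn⟩ := hbd s0 List.mem_cons_self
    simp only [List.foldl_nil, List.nil_append]
    have hC : writeBlock (List.replicate n.toNat 0) [s0]
        = (List.replicate n.toNat 0).set (s0 - 1).toNat 1 := by
      simp [writeBlock]
    constructor
    · -- normal form
      rw [List.foldl_cons, List.foldl_nil, hC]
      apply List.ext_getElem
      · simp [length_nf]
      · intro i hi hi'
        rw [List.getElem_set, getElem_nf _ _ _ hi']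
        rw [List.length_set, List.length_replicate] at hi
        by_cases hij : (s0 - 1).toNat = i
        · rw [if_pos hij]
          have hmem : (1 + (i : Int)) ∈ [s0] := by simp; omega
          have hmem' : (i : Int) ∉ [s0] := by simp; omega
          rw [if_pos hmem, if_neg hmem']
        · rw [if_neg hij, List.getElem_replicate]
          have hmem : (1 + (i : Int)) ∉ [s0] := by simp; omega
          rw [if_neg hmem]
    constructor
    · -- count
      rw [List.foldl_cons, List.foldl_nil, hC]
      have hlen : (s0 - 1).toNat < (List.replicate n.toNat (0 : Int)).length := by
        simp; omega
      rw [count_set_int _ _ hlen]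
      simp [List.count_replicate]
    · refine ⟨by simp, by simp [List.getLast!], ?_⟩
      intro x hx
      simp at hx
      simp [hx, List.getLast!]
  | append_singleton rest' j ih =>
    intro hsort hbd
    have hSsnoc : s0 :: (rest' ++ [j]) = (s0 :: rest') ++ [j] := by simp
    have hsort' : (s0 :: rest').Pairwise (· < ·) := by
      rw [hSsnoc] at hsort
      exact (List.pairwise_append.mp hsort).1
    have hlt : ∀ x ∈ s0 :: rest', x < j := by
      rw [hSsnoc] at hsort
      intro x hx
      exact (List.pairwise_append.mp hsort).2.2 x hx j (by simp)
    have hbd' : ∀ x ∈ s0 :: rest', 1 ≤ x ∧ x ≤ n := by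
      intro x hx; exact hbd x (by rw [hSsnoc]; exact List.mem_append_left _ hx)
    obtain ⟨hj1, hjn⟩ := hbd j (by rw [hSsnoc]; exact List.mem_append_right _ (by simp))
    obtain ⟨hC', hcount', hne', hmem', hmax'⟩ := ih hsort' hbd'
    set st' := rest'.foldl blockStep ([], [s0]) with hst'
    have hfold : (rest' ++ [j]).foldl blockStep ([], [s0]) = blockStep st' j := by
      rw [List.foldl_append]; rfl
    have hlen' : ((st'.1 ++ [st'.2]).foldl writeBlock (List.replicate n.toNat 0)).length
        = n.toNat := by
      rw [foldl_writeBlock_length]; simp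
    have hbig? : ((st'.1 ++ [st'.2]).foldl writeBlock (List.replicate n.toNat 0))[(j - 1).toNat]? = some 0 := by
      rw [hC', List.getElem?_eq_getElem (by rw [length_nf]; omega),
        getElem_nf_big _ n j hlt hj1 (by rw [length_nf]; omega)]
    have hbigE : ∀ (hh : (j - 1).toNat < ((st'.1 ++ [st'.2]).foldl writeBlock (List.replicate n.toNat 0)).length),
        ((st'.1 ++ [st'.2]).foldl writeBlock (List.replicate n.toNat 0))[(j - 1).toNat]'hh = 0 := by
      intro hh
      have h := List.getElem?_eq_getElem hh
      rw [hbig?] at h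
      exact (Option.some.inj h).symm
    by_cases hj : j = st'.2.getLast! + 1
    · -- j extends the current block
      have hbs : blockStep st' j = (st'.1, st'.2 ++ [j]) := by
        simp only [blockStep]; rw [if_pos hj]
      have hj1mem : j - 1 ∈ s0 :: rest' := by
        have : j - 1 = st'.2.getLast! := by omega
        rw [this]; exact hmem'
      have hCnew : ((st'.1 ++ [st'.2 ++ [j]]).foldl writeBlock (List.replicate n.toNat 0))
          = ((st'.1 ++ [st'.2]).foldl writeBlock (List.replicate n.toNat 0)).set (j - 1).toNat (-1) := by
        rw [List.foldl_append, List.foldl_append]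
        simp only [List.foldl_cons, List.foldl_nil]
        rw [writeBlock_snoc _ _ _ hne']
      rw [hfold, hbs]
      simp only
      refine ⟨?_, ?_, by simp, ?_, ?_⟩
      · rw [hCnew, hC', hSsnoc, nf_snoc _ n j hj1 hjn hlt, if_pos hj1mem]
      · rw [hCnew, count_set_int _ _ (by omega), hbigE]
        rw [if_neg (by norm_num : ¬ (0 : Int) = 1), if_neg (by norm_num : ¬ (-1 : Int) = 1)]
        omega
      · rw [getLast!_concat]
        rw [hSsnoc]; exact List.mem_append_right _ (by simp)
      · intro x hx
        rw [getLast!_concat]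
        rw [hSsnoc, List.mem_append] at hx
        rcases hx with hx | hx
        · have := hlt x hx; omega
        · simp at hx; omega
    · -- j starts a new block
      have hbs : blockStep st' j = (st'.1 ++ [st'.2], [j]) := by
        simp only [blockStep]; rw [if_neg hj]
      have hj1mem : j - 1 ∉ s0 :: rest' := by
        intro h
        have h1 := hmax' _ h
        have h2 := hlt _ hmem'
        omega
      have hCnew : (((st'.1 ++ [st'.2]) ++ [[j]]).foldl writeBlock (List.replicate n.toNat 0))
          = ((st'.1 ++ [st'.2]).foldl writeBlock (List.replicate n.toNat 0)).set (j - 1).toNat 1 := by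
        rw [List.foldl_append]
        simp [writeBlock]
      rw [hfold, hbs]
      simp only
      refine ⟨?_, ?_, by simp, ?_, ?_⟩
      · rw [hCnew, hC', hSsnoc, nf_snoc _ n j hj1 hjn hlt, if_neg hj1mem]
      · rw [hCnew, count_set_int _ _ (by omega), hbigE]
        rw [if_neg (by norm_num : ¬ (0 : Int) = 1), if_pos rfl]
        simp only [List.length_append, List.length_cons, List.length_nil]
        push_cast
        omega
      · rw [show ([j] : List Int).getLast! = j from by simp [List.getLast!], hSsnoc]
        exact List.mem_append_right _ (by simp)
      · intro x hx
        rw [show ([j] : List Int).getLast! = j from by simp [List.getLast!]]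
        rw [hSsnoc, List.mem_append] at hx
        rcases hx with hx | hx
        · have := hlt x hx; omega
        · simp at hx; omega

-- Sof is strictly increasing, bounded, and its membership is B's predicate
lemma Sof_sorted (bv : List Int) (k : Int) : (Sof bv k).Pairwise (· < ·) := by
  unfold Sof
  rw [List.pairwise_append]
  refine ⟨(PySem.List.pairwise_lt_pyRange_one 1 k).filter _, by simp, ?_⟩
  intro x hx y hy
  simp at hy
  subst hy
  exact (PySem.List.mem_pyRange_one.mp (List.mem_of_mem_filter hx)).2

lemma Sof_bd (bv : List Int) (k n : Int) (h1 : 1 ≤ k) (h2 : k ≤ n) :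
    ∀ j ∈ Sof bv k, 1 ≤ j ∧ j ≤ n := by
  intro j hj
  unfold Sof at hj
  rw [List.mem_append] at hj
  rcases hj with hj | hj
  · have := PySem.List.mem_pyRange_one.mp (List.mem_of_mem_filter hj)
    omega
  · simp at hj; omega

lemma mem_Sof (bv : List Int) (k j : Int) : j ∈ Sof bv k ↔ altS bv k j = true := by
  unfold Sof altS
  simp [List.mem_filter, PySem.List.mem_pyRange_one]
  tauto

-- A's per-k row computes the normal form
lemma theorem1Row_eq_nf (bv : List Int) (n k : Int) (h1 : 1 ≤ k) (h2 : k ≤ n) :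
    theorem1Row bv n k = (nf (Sof bv k) n, ((nf (Sof bv k) n).count 1 : Int) - 1) := by
  obtain ⟨s0, rest, hS⟩ : ∃ s0 rest, Sof bv k = s0 :: rest := by
    unfold Sof
    cases hF : (PySem.List.pyRange 1 k 1).filter (fun j => PySem.List.pyGetD bv (j - 1) 0 == 1) with
    | nil => exact ⟨k, [], by simp⟩
    | cons f0 ft => exact ⟨f0, ft ++ [k], by simp⟩
  have hsort := Sof_sorted bv k
  have hbd := Sof_bd bv k n h1 h2
  rw [hS] at hsort hbd
  obtain ⟨hC, hcount, _, _, _⟩ := blocks_char n s0 rest hsort hbd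
  unfold theorem1Row
  have hSk : (PySem.List.pyRange 1 k 1).filter (fun j => PySem.List.pyGetD bv (j - 1) 0 == 1) ++ [k] = s0 :: rest := hS
  simp only [hSk]
  rw [hS]
  refine Prod.ext ?_ ?_
  · simpa using hC
  · simp only
    rw [← hC, ← hcount]
    simp only [List.length_append, List.length_cons, List.length_nil]
    push_cast
    ring

-- B's row computes the normal form
lemma altRow_eq_nf (bv : List Int) (n k : Int) :
    altRow bv n k = (nf (Sof bv k) n, ((nf (Sof bv k) n).count 1 : Int) - 1) := by
  unfold altRow nf
  have hfun : (fun j => if altS bv k j then (if altS bv k (j - 1) then (-1 : Int) else 1) else 0)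
      = (fun j => if j ∈ Sof bv k then (if j - 1 ∈ Sof bv k then (-1 : Int) else 1) else 0) := by
    funext j
    by_cases hj : j ∈ Sof bv k
    · rw [if_pos ((mem_Sof bv k j).mp hj), if_pos hj]
      by_cases hj' : j - 1 ∈ Sof bv k
      · rw [if_pos ((mem_Sof bv k _).mp hj'), if_pos hj']
      · rw [if_neg (fun h => hj' ((mem_Sof bv k _).mpr h)), if_neg hj']
    · rw [if_neg (fun h => hj ((mem_Sof bv k j).mpr h)), if_neg hj]
  rw [hfun]
  simp only [PySem.List.count_eq]

lemma row_eq (bv : List Int) (n k : Int) (h1 : 1 ≤ k) (h2 : k ≤ n) :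
    altRow bv n k = theorem1Row bv n k := by
  rw [altRow_eq_nf, theorem1Row_eq_nf bv n k h1 h2]

-- altS only reads bv below index n
lemma altS_congr (bv bv' : List Int) (n k : Int)
    (hag : ∀ i : Int, 0 ≤ i → i < n → PySem.List.pyGetD bv' i 0 = PySem.List.pyGetD bv i 0)
    (hk : k ≤ n) (j : Int) : altS bv' k j = altS bv k j := by
  unfold altS
  by_cases h1 : (1 : Int) ≤ j
  · by_cases h2 : j < k
    · rw [hag (j - 1) (by omega) (by omega)]
    · simp [h2]
  · simp [h1]

lemma altRow_congr (bv bv' : List Int) (n k : Int)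
    (hag : ∀ i : Int, 0 ≤ i → i < n → PySem.List.pyGetD bv' i 0 = PySem.List.pyGetD bv i 0)
    (hk : k ≤ n) : altRow bv' n k = altRow bv n k := by
  unfold altRow
  have : (fun j => if altS bv' k j then (if altS bv' k (j - 1) then (-1 : Int) else 1) else 0)
      = (fun j => if altS bv k j then (if altS bv k (j - 1) then (-1 : Int) else 1) else 0) := by
    funext j
    rw [altS_congr bv bv' n k hag hk, altS_congr bv bv' n k hag hk]
  rw [this]

-- altBits is the n-prefix of get_binary; they agree on every index the ports read
lemma pyGetD_altBits (v n i : Int) (h0 : 0 ≤ i) (hn : i < n) :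
    PySem.List.pyGetD (altBits v n) i 0 = PySem.List.pyGetD (get_binary v n) i 0 := by
  have hlt : i.toNat < n.toNat := by omega
  rw [PySem.List.pyGetD_of_nonneg _ _ h0, PySem.List.pyGetD_of_nonneg _ _ h0]
  unfold altBits get_binary
  simp [List.getD_eq_getElem?_getD, hlt]

-- length of B's row vector
lemma altRow_len (bv : List Int) (n k : Int) : (altRow bv n k).1.length = n.toNat := by
  simp [altRow, PySem.List.length_pyRange_one]

-- B's inline mirror is A's mirrorRow on nonempty vectors
lemma mirror_inline (cr : List Int × Int) (h : cr.1 ≠ []) :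
    ((-(PySem.List.pyGetD cr.1 0 0)) :: PySem.List.slice cr.1 (some 1) none,
      cr.2 - PySem.List.pyGetD cr.1 0 0) = mirrorRow cr := by
  obtain ⟨c, r⟩ := cr
  obtain ⟨x, t, rfl⟩ : ∃ x t, c = x :: t := by
    cases c with
    | nil => exact absurd rfl h
    | cons x t => exact ⟨x, t, rfl⟩
  simp [mirrorRow, PySem.List.slice_from_one, PySem.List.pyGetD_zero_cons]

lemma set_add_of_mem {β : Type} [BEq β] [LawfulBEq β] (s : PySem.Set β) (e : β) (h : e ∈ s) :
    PySem.Set.add s e = s := by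
  simp [PySem.Set.add, PySem.Set.contains, h]

lemma set_add_of_not_mem {β : Type} [BEq β] [LawfulBEq β] (s : PySem.Set β) (e : β) (h : ¬ e ∈ s) :
    PySem.Set.add s e = s ++ [e] := by
  simp [PySem.Set.add, PySem.Set.contains, h]

-- membership in a fold of mapped set-adds
lemma mem_foldl_add_map {α β : Type} [BEq β] [LawfulBEq β] (l : List α) (f : α → β) :
    ∀ (s0 : PySem.Set β) (y : β),
      y ∈ l.foldl (fun m cr => PySem.Set.add m (f cr)) s0 ↔ y ∈ s0 ∨ ∃ x ∈ l, f x = y := by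
  induction l with
  | nil => simp
  | cons x t ih =>
    intro s0 y
    simp only [List.foldl_cons, ih, PySem.Set.mem_add, List.mem_cons]
    constructor
    · rintro (⟨h | rfl⟩ | ⟨x', hx', rfl⟩)
      · exact Or.inl h
      · exact Or.inr ⟨x, Or.inl rfl, rfl⟩
      · exact Or.inr ⟨x', Or.inr hx', rfl⟩
    · rintro (h | ⟨x', hx' | hx', rfl⟩)
      · exact Or.inl (Or.inl h)
      · subst hx'; exact Or.inl (Or.inr rfl)
      · exact Or.inr ⟨x', hx', rfl⟩

-- membership in a fold of guarded set-adds
lemma mem_foldl_add_if {β : Type} [BEq β] [LawfulBEq β] (l : List Int) (g : Int → Bool)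
    (row : Int → β) :
    ∀ (s0 : PySem.Set β) (x : β),
      x ∈ l.foldl (fun s k => if g k then PySem.Set.add s (row k) else s) s0 →
        x ∈ s0 ∨ ∃ k ∈ l, x = row k := by
  induction l with
  | nil => simp
  | cons k t ih =>
    intro s0 x hx
    simp only [List.foldl_cons] at hx
    by_cases hg : g k
    · rw [if_pos hg] at hx
      rcases ih _ x hx with h | ⟨k', hk', rfl⟩
      · rcases (PySem.Set.mem_add _ _ _).mp h with h | rfl
        · exact Or.inl h
        · exact Or.inr ⟨k, by simp, rfl⟩
      · exact Or.inr ⟨k', by simp [hk'], rfl⟩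
    · rw [if_neg hg] at hx
      rcases ih _ x hx with h | ⟨k', hk', rfl⟩
      · exact Or.inl h
      · exact Or.inr ⟨k', by simp [hk'], rfl⟩

-- every member of theorem1Core has a length-n coefficient vector
lemma theorem1Core_len (bv : List Int) (n : Int) :
    ∀ x ∈ theorem1Core bv n, x.1.length = n.toNat := by
  intro x hx
  rcases mem_foldl_add_if _ _ _ _ x hx with h | ⟨k, _, rfl⟩
  · simp [PySem.Set.empty] at h
  · simp [theorem1Row, foldl_writeBlock_length]

lemma generate_theorem2_len (a n : Int) :
    ∀ x ∈ generate_theorem2 a n, x.1.length = n.toNat := by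
  intro x hx
  unfold generate_theorem2 at hx
  rcases (mem_foldl_add_map _ _ _ x).mp hx with h | ⟨y, hy, rfl⟩
  · simp [PySem.Set.empty] at h
  · rw [show (mirrorRow y).1 = y.1.set 0 (-(PySem.List.pyGetD y.1 0 0)) from rfl]
    rw [List.length_set]
    exact theorem1Core_len _ _ y hy

-- pushing one Set.add through the mirror fold
lemma foldMirror_add (s : PySem.Set (List Int × Int)) (e : List Int × Int) :
    (PySem.Set.add s e).foldl (fun m cr => PySem.Set.add m (mirrorRow cr)) PySem.Set.empty
      = PySem.Set.add (s.foldl (fun m cr => PySem.Set.add m (mirrorRow cr)) PySem.Set.empty)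
          (mirrorRow e) := by
  by_cases h : e ∈ s
  · rw [set_add_of_mem s e h, set_add_of_mem _ _ ?_]
    exact (mem_foldl_add_map s mirrorRow PySem.Set.empty (mirrorRow e)).mpr
      (Or.inr ⟨e, h, rfl⟩)
  · rw [set_add_of_not_mem s e h, List.foldl_append]
    simp

-- a guarded add-mirror fold is the mirror fold of the guarded add fold
lemma fold_mirror_exchange (l : List Int) (g : Int → Bool) (row : Int → List Int × Int) :
    l.foldl (fun s k => if g k then PySem.Set.add s (mirrorRow (row k)) else s) PySem.Set.empty
      = (l.foldl (fun s k => if g k then PySem.Set.add s (row k) else s)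
          PySem.Set.empty).foldl
          (fun s cr => PySem.Set.add s (mirrorRow cr)) PySem.Set.empty := by
  induction l using List.reverseRecOn with
  | nil => simp [PySem.Set.empty]
  | append_singleton t k ih =>
    rw [List.foldl_append, List.foldl_append]
    simp only [List.foldl_cons, List.foldl_nil]
    by_cases hg : g k
    · rw [if_pos hg, if_pos hg, foldMirror_add, ih]
    · rw [if_neg hg, if_neg hg, ih]

-- tuple-slice surgery equals list.set
lemma surgery (c : List Int) (m : Int) (hm1 : 1 ≤ m) (hlen : m ≤ (c.length : Int)) :
    PySem.List.slice c none (some (m - 1)) ++ [0] ++ PySem.List.slice c (some m) none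
      = c.set (m - 1).toNat 0 := by
  rw [PySem.List.slice_to _ (show (0 : Int) ≤ m - 1 by omega),
    PySem.List.slice_from _ (show (0 : Int) ≤ m by omega),
    List.set_eq_take_cons_drop _ (by omega)]
  rw [show m.toNat = (m - 1).toNat + 1 from by omega]
  simp

-- zeroed rows fold = A's inline transform fold (L form, no rhs adjustment)
lemma zeroed_fold_L (X : PySem.Set (List Int × Int)) (m n : Int) (hm1 : 1 ≤ m) (hmn : m ≤ n)
    (hlen : ∀ x ∈ X, x.1.length = n.toNat) (init : PySem.Set (List Int × Int)) :
    (X.map (fun cr =>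
        (PySem.List.slice cr.1 none (some (m - 1)) ++ [0] ++ PySem.List.slice cr.1 (some m) none,
         cr.2))).foldl PySem.Set.add init
      = X.foldl (fun f cr => PySem.Set.add f (cr.1.set (m - 1).toNat 0, cr.2)) init := by
  rw [List.foldl_map]
  apply PySem.List.foldl_congr_mem'
  intro x hx acc
  rw [surgery x.1 m hm1 (by rw [hlen x hx]; omega)]

-- zeroed rows fold = A's inline transform fold (U form, rhs adjusted by the zeroed entry)
lemma zeroed_fold_U (X : PySem.Set (List Int × Int)) (m n : Int) (hm1 : 1 ≤ m) (hmn : m ≤ n)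
    (hlen : ∀ x ∈ X, x.1.length = n.toNat) (init : PySem.Set (List Int × Int)) :
    (X.map (fun cr =>
        (PySem.List.slice cr.1 none (some (m - 1)) ++ [0] ++ PySem.List.slice cr.1 (some m) none,
         cr.2 - PySem.List.pyGetD cr.1 (m - 1) 0))).foldl PySem.Set.add init
      = X.foldl (fun f cr =>
          PySem.Set.add f (cr.1.set (m - 1).toNat 0, cr.2 - PySem.List.pyGetD cr.1 (m - 1) 0)) init := by
  rw [List.foldl_map]
  apply PySem.List.foldl_congr_mem'
  intro x hx acc
  rw [surgery x.1 m hm1 (by rw [hlen x hx]; omega)]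

-- B's U fold = theorem1Core on A's bit list
lemma U_eq (b n : Int) :
    (PySem.List.pyRange 1 (n + 1) 1).foldl
      (fun (U : PySem.Set (List Int × Int)) k =>
        if PySem.List.pyGetD (altBits b n) (k - 1) 0 == 0 then
          PySem.Set.add U (altRow (altBits b n) n k)
        else U) PySem.Set.empty
    = theorem1Core (get_binary b n) n := by
  unfold theorem1Core
  apply PySem.List.foldl_congr_mem'
  intro k hk acc
  obtain ⟨hk1, hk2⟩ := PySem.List.mem_pyRange_one.mp hk
  rw [pyGetD_altBits b n (k - 1) (by omega) (by omega)]
  rw [altRow_congr (get_binary b n) (altBits b n) n k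
    (fun i h0 h1 => pyGetD_altBits b n i h0 h1) (by omega)]
  rw [row_eq _ n k hk1 (by omega)]

-- B's L fold = generate_theorem2
lemma L_eq (a n : Int) :
    (PySem.List.pyRange 1 (n + 1) 1).foldl
      (fun (L : PySem.Set (List Int × Int)) k =>
        if PySem.List.pyGetD (altBits (2 ^ n.toNat - 1 - a) n) (k - 1) 0 == 0 then
          let r := altRow (altBits (2 ^ n.toNat - 1 - a) n) n k
          let c0 := PySem.List.pyGetD r.1 0 0
          PySem.Set.add L ((-c0) :: PySem.List.slice r.1 (some 1) none, r.2 - c0)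
        else L) PySem.Set.empty
    = generate_theorem2 a n := by
  have step1 : (PySem.List.pyRange 1 (n + 1) 1).foldl
      (fun (L : PySem.Set (List Int × Int)) k =>
        if PySem.List.pyGetD (altBits (2 ^ n.toNat - 1 - a) n) (k - 1) 0 == 0 then
          let r := altRow (altBits (2 ^ n.toNat - 1 - a) n) n k
          let c0 := PySem.List.pyGetD r.1 0 0
          PySem.Set.add L ((-c0) :: PySem.List.slice r.1 (some 1) none, r.2 - c0)
        else L) PySem.Set.empty
      = (PySem.List.pyRange 1 (n + 1) 1).foldl
        (fun (L : PySem.Set (List Int × Int)) k =>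
          if (fun k => PySem.List.pyGetD (get_binary (2 ^ n.toNat - 1 - a) n) (k - 1) 0 == 0) k then
            PySem.Set.add L
              (mirrorRow ((fun k => theorem1Row (get_binary (2 ^ n.toNat - 1 - a) n) n k) k))
          else L) PySem.Set.empty := by
    apply PySem.List.foldl_congr_mem'
    intro k hk acc
    obtain ⟨hk1, hk2⟩ := PySem.List.mem_pyRange_one.mp hk
    simp only
    rw [pyGetD_altBits _ n (k - 1) (by omega) (by omega)]
    rw [mirror_inline _ (by
      rw [← List.length_pos_iff, altRow_len]
      omega)]
    rw [altRow_congr (get_binary (2 ^ n.toNat - 1 - a) n) (altBits (2 ^ n.toNat - 1 - a) n) n k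
      (fun i h0 h1 => pyGetD_altBits _ n i h0 h1) (by omega)]
    rw [row_eq _ n k hk1 (by omega)]
  rw [step1, fold_mirror_exchange _
    (fun k => PySem.List.pyGetD (get_binary (2 ^ n.toNat - 1 - a) n) (k - 1) 0 == 0)
    (fun k => theorem1Row (get_binary (2 ^ n.toNat - 1 - a) n) n k)]
  rfl

-- a break that has fired keeps its value
lemma break_stay (t : List Int) (p : Int → Bool) (m : Int) (hm : ¬ m = -1) :
    t.foldl (fun m i => if m == -1 && p i then i + 1 else m) m = m := by
  induction t with
  | nil => rfl
  | cons i t ih =>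
    simp only [List.foldl_cons]
    rw [show (m == -1 && p i) = false by
      rw [show (m == -1) = false by simpa using hm]; rfl]
    simpa using ih

-- the break-search fold = find?
lemma find_break (l : List Int) (p q : Int → Bool)
    (hl : ∀ i ∈ l, 0 ≤ i) (hpq : ∀ i ∈ l, p i = q i) :
    l.foldl (fun m i => if m == -1 && p i then i + 1 else m) (-1) =
      (((l.find? q).map (fun i => i + 1)).getD (-1)) := by
  induction l with
  | nil => rfl
  | cons i t ih =>
    have h0 : (0 : Int) ≤ i := hl i List.mem_cons_self
    have hpq0 := hpq i List.mem_cons_self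
    simp only [List.foldl_cons, List.find?_cons]
    by_cases hq : q i = true
    · rw [hq]
      rw [show ((-1 : Int) == -1 && p i) = true by rw [hpq0, hq]; rfl]
      simp only [if_true]
      rw [break_stay t p (i + 1) (by omega)]
      rfl
    · rw [Bool.not_eq_true] at hq
      rw [hq]
      rw [show ((-1 : Int) == -1 && p i) = false by rw [hpq0, hq]; rfl]
      simp only [Bool.false_eq_true, if_false]
      exact ih (fun j hj => hl j (List.mem_cons_of_mem i hj))
        (fun j hj => hpq j (List.mem_cons_of_mem i hj))

-- ===== VERDICT (by name: the statement is the Claim_ definition above) =====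
theorem generate_theorem3_spec : Claim_equal_generate_theorem3 := by
  unfold Claim_equal_generate_theorem3
  intro a b n _ hpre
  unfold Spec_generate_theorem3
  have hm := find_break (PySem.List.pyRange 0 n 1)
      (fun i => !(PySem.List.pyGetD (get_binary a n) i 0 == PySem.List.pyGetD (get_binary b n) i 0))
      (fun i => !(PySem.List.pyGetD (altBits a n) i 0 == PySem.List.pyGetD (altBits b n) i 0))
      (fun i hi => (PySem.List.mem_pyRange_one.mp hi).1)
      (fun i hi => by
        have h1 := PySem.List.mem_pyRange_one.mp hi
        show (!(PySem.List.pyGetD (get_binary a n) i 0 == PySem.List.pyGetD (get_binary b n) i 0))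
            = (!(PySem.List.pyGetD (altBits a n) i 0 == PySem.List.pyGetD (altBits b n) i 0))
        rw [pyGetD_altBits a n i h1.1 h1.2, pyGetD_altBits b n i h1.1 h1.2])
  simp only [generate_theorem3, generate_theorem3_alt]
  rw [hm]
  cases hfind : (PySem.List.pyRange 0 n 1).find?
      (fun i => !(PySem.List.pyGetD (altBits a n) i 0 == PySem.List.pyGetD (altBits b n) i 0)) with
  | none => simp
  | some i =>
    have hi := PySem.List.mem_pyRange_one.mp (List.mem_of_find?_eq_some hfind)
    simp only [Option.map_some, Option.getD_some]
    have hne : ((i + 1 : Int) == -1) = false := by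
      simp; omega
    rw [hne]
    simp only [Bool.false_eq_true, if_false, if_true]
    rw [U_eq b n, L_eq a n]
    set m := i + 1 with hmdef
    have hm1 : 1 ≤ m := by omega
    have hmn : m ≤ n := by omega
    have hUlen := theorem1Core_len (get_binary b n) n
    have hLlen := generate_theorem2_len a n
    rw [zeroed_fold_L (generate_theorem2 a n) m n hm1 hmn hLlen,
      zeroed_fold_U (theorem1Core (get_binary b n) n) m n hm1 hmn hUlen,
      zeroed_fold_U (theorem1Core (get_binary b n) n) m n hm1 hmn hUlen,
      zeroed_fold_L (generate_theorem2 a n) m n hm1 hmn hLlen]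
    rfl
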